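-- pv_equiv track=rewrite | github.com/APPWORK14700/Nextgen-Athletes | backend/app/services/audit_service.py | _calculate_gdpr_metrics
-- ===== SOURCE A (Python) =====
-- from typing import Optional, Dict, Any, List
--
-- def _calculate_gdpr_metrics(events: List[Dict[str, Any]]) -> Dict[str, Any]:
--     """Calculate GDPR compliance metrics"""
--     metrics = {
--         "data_access_events": 0,
--         "data_modification_events": 0,
--         "data_deletion_events": 0,
--         "user_consent_events": 0,
--         "data_export_events": 0
--     }
--
--     for event in events:
--         action = event.get("action", "")
--         if action in ["READ", "SEARCH"]:
--             metrics["data_access_events"] += 1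
--         elif action in ["CREATE", "UPDATE"]:
--             metrics["data_modification_events"] += 1
--         elif action in ["DELETE", "SOFT_DELETE"]:
--             metrics["data_deletion_events"] += 1
--         elif action == "EXPORT":
--             metrics["data_export_events"] += 1
--
--     return metrics
-- ===== SOURCE B (Python) =====
-- from typing import Optional, Dict, Any, List
--
-- def _calculate_gdpr_metrics(events: List[Dict[str, Any]]) -> Dict[str, Any]:
--     """Calculate GDPR compliance metrics (count-first-then-combine)."""
--     actions = [event.get("action", "") for event in events]
--     return {
--         "data_access_events": actions.count("READ") + actions.count("SEARCH"),
--         "data_modification_events": actions.count("CREATE") + actions.count("UPDATE"),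
--         "data_deletion_events": actions.count("DELETE") + actions.count("SOFT_DELETE"),
--         "user_consent_events": 0,
--         "data_export_events": actions.count("EXPORT"),
--     }
-- ===== Notes on version B (the rewrite author's own statement) =====
-- stated objective: simpler
-- what changed: Replaces the per-event if/elif classification loop that mutates a metrics dict with a two-phase structure: first extract all action strings, then assemble the result dict directly from bucket counts (list.count), with user_consent_events a literal 0.
import Mathlib
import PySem

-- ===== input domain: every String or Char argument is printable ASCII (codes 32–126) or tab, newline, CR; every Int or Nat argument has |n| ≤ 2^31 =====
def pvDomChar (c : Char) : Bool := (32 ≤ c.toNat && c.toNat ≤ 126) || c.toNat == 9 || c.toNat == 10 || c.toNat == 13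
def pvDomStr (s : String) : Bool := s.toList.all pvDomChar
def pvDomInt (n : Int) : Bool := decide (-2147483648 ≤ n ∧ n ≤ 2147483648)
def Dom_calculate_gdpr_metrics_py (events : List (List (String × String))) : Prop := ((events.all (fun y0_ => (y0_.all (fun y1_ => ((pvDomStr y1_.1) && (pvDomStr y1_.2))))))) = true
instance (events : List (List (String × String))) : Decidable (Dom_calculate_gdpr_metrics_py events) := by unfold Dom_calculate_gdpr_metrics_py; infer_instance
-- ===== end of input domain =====

-- B replaces A's per-event if/elif classification (mutating a metrics dict) by a two-phase
-- count-then-combine structure (extract all actions, then build the dict from bucket counts): simpler.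

-- ===== PORT A =====
-- literal transliteration: build the metrics dict, then one if/elif chain per event
def calculate_gdpr_metrics_py (events : List (List (String × String))) : List (String × Int) :=
  let metrics : PySem.Dict String Int :=
    (((((PySem.Dict.empty.insert "data_access_events" 0).insert "data_modification_events" 0).insert
        "data_deletion_events" 0).insert "user_consent_events" 0).insert "data_export_events" 0)
  let metrics := events.foldl (fun m ev =>
    let action := (PySem.Dict.mk ev).getD "action" ""
    if action = "READ" ∨ action = "SEARCH" then m.modify "data_access_events" 0 (· + 1)
    else if action = "CREATE" ∨ action = "UPDATE" then m.modify "data_modification_events" 0 (· + 1)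
    else if action = "DELETE" ∨ action = "SOFT_DELETE" then m.modify "data_deletion_events" 0 (· + 1)
    else if action = "EXPORT" then m.modify "data_export_events" 0 (· + 1)
    else m) metrics
  metrics.items

-- ===== PORT B =====
-- phase 1: the list of action strings; phase 2: assemble the result from bucket counts
def calculate_gdpr_metrics_py_alt (events : List (List (String × String))) : List (String × Int) :=
  let actions := events.map (fun ev => (PySem.Dict.mk ev).getD "action" "")
  [("data_access_events", (actions.count "READ" : Int) + (actions.count "SEARCH" : Int)),
   ("data_modification_events", (actions.count "CREATE" : Int) + (actions.count "UPDATE" : Int)),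
   ("data_deletion_events", (actions.count "DELETE" : Int) + (actions.count "SOFT_DELETE" : Int)),
   ("user_consent_events", 0),
   ("data_export_events", (actions.count "EXPORT" : Int))]

-- ===== PRECONDITION & SPEC =====
def Spec_calculate_gdpr_metrics_py (events : List (List (String × String))) (out : List (String × Int)) : Prop := out = calculate_gdpr_metrics_py_alt events
instance (events : List (List (String × String))) (out : List (String × Int)) : Decidable (Spec_calculate_gdpr_metrics_py events out) := by unfold Spec_calculate_gdpr_metrics_py; infer_instance

-- ===== CLAIM (what is proved, stated in full; the proofs are below) =====
def Claim_equal_calculate_gdpr_metrics_py : Prop := ∀ (events : List (List (String × String))), Dom_calculate_gdpr_metrics_py events → Spec_calculate_gdpr_metrics_py events (calculate_gdpr_metrics_py events)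

-- ===== LEMMAS AND PROOFS =====

-- the 5-key metrics dict with given counter values
def pvMk5 (a b c d e : Int) : PySem.Dict String Int :=
  PySem.Dict.mk [("data_access_events", a), ("data_modification_events", b),
                 ("data_deletion_events", c), ("user_consent_events", d), ("data_export_events", e)]

-- A's loop from any counter state adds the bucket counts of the remaining actions
theorem pv_loop_eq (events : List (List (String × String))) (a b c d e : Int) :
    (events.foldl (fun m ev =>
      let action := (PySem.Dict.mk ev).getD "action" ""
      if action = "READ" ∨ action = "SEARCH" then m.modify "data_access_events" 0 (· + 1)
      else if action = "CREATE" ∨ action = "UPDATE" then m.modify "data_modification_events" 0 (· + 1)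
      else if action = "DELETE" ∨ action = "SOFT_DELETE" then m.modify "data_deletion_events" 0 (· + 1)
      else if action = "EXPORT" then m.modify "data_export_events" 0 (· + 1)
      else m) (pvMk5 a b c d e)) =
    (let actions := events.map (fun ev => (PySem.Dict.mk ev).getD "action" "")
     pvMk5 (a + actions.count "READ" + actions.count "SEARCH")
           (b + actions.count "CREATE" + actions.count "UPDATE")
           (c + actions.count "DELETE" + actions.count "SOFT_DELETE")
           d
           (e + actions.count "EXPORT")) := by
  induction events generalizing a b c d e with
  | nil => simp [pvMk5]
  | cons ev evs ih =>
    simp only [List.foldl_cons, List.map_cons]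
    by_cases h1 : (PySem.Dict.mk ev).getD "action" "" = "READ" ∨ (PySem.Dict.mk ev).getD "action" "" = "SEARCH"
    · have hstep : (pvMk5 a b c d e).modify "data_access_events" 0 (· + 1) = pvMk5 (a + 1) b c d e := by rfl
      simp only [if_pos h1, hstep, ih]
      rcases h1 with h | h <;> simp [pvMk5, h] <;> omega
    · by_cases h2 : (PySem.Dict.mk ev).getD "action" "" = "CREATE" ∨ (PySem.Dict.mk ev).getD "action" "" = "UPDATE"
      · have hstep : (pvMk5 a b c d e).modify "data_modification_events" 0 (· + 1) = pvMk5 a (b + 1) c d e := by rfl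
        simp only [if_neg h1, if_pos h2, hstep, ih]
        rcases h2 with h | h <;> simp [pvMk5, h] <;> omega
      · by_cases h3 : (PySem.Dict.mk ev).getD "action" "" = "DELETE" ∨ (PySem.Dict.mk ev).getD "action" "" = "SOFT_DELETE"
        · have hstep : (pvMk5 a b c d e).modify "data_deletion_events" 0 (· + 1) = pvMk5 a b (c + 1) d e := by rfl
          simp only [if_neg h1, if_neg h2, if_pos h3, hstep, ih]
          rcases h3 with h | h <;> simp [pvMk5, h] <;> omega
        · by_cases h4 : (PySem.Dict.mk ev).getD "action" "" = "EXPORT"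
          · have hstep : (pvMk5 a b c d e).modify "data_export_events" 0 (· + 1) = pvMk5 a b c d (e + 1) := by rfl
            simp only [if_neg h1, if_neg h2, if_neg h3, if_pos h4, hstep, ih]
            simp [pvMk5, h4]; omega
          · simp only [if_neg h1, if_neg h2, if_neg h3, if_neg h4, ih]
            rw [not_or] at h1 h2 h3
            simp [pvMk5, h1.1, h1.2, h2.1, h2.2, h3.1, h3.2, h4]

-- ===== VERDICT (by name: the statement is the Claim_ definition above) =====
theorem calculate_gdpr_metrics_py_spec : Claim_equal_calculate_gdpr_metrics_py := by
  intro events _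
  unfold Spec_calculate_gdpr_metrics_py calculate_gdpr_metrics_py calculate_gdpr_metrics_py_alt
  have h0 : (((((PySem.Dict.empty.insert "data_access_events" (0:Int)).insert "data_modification_events" 0).insert
        "data_deletion_events" 0).insert "user_consent_events" 0).insert "data_export_events" 0) = pvMk5 0 0 0 0 0 := by
    rfl
  simp only [h0, pv_loop_eq]
  simp [pvMk5]
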